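-- pv_equiv track=rewrite | github.com/Hasa16/ICS-33 | q4helper/q4solution.py | slice_gen
-- ===== SOURCE A (Python) =====
-- def slice_gen(iterable, start, stop, step):
--     itera = iter(iterable)
--     if start < 0 or stop < 0 or step <= 0:
--         raise AssertionError
--     count = -1
--     next_item = start
--     while True:
--         count += 1
--         try:
--             item = next(itera)
--             if count == stop:
--                 break
--             elif count == next_item:
--                 next_item = next_item + step
--                 yield item
--         except:
--             return
-- ===== SOURCE B (Python) =====
-- def slice_gen(iterable, start, stop, step):
--     if start < 0 or stop < 0 or step <= 0:
--         raise AssertionError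
--     items = list(iterable)
--     bound = min(stop, len(items))
--     i = start
--     while i < bound:
--         yield items[i]
--         i += step
-- ===== Notes on version B (the rewrite author's own statement) =====
-- stated objective: simpler
-- what changed: B materializes the iterable once and jumps directly through the yield indices start, start+step, ... below min(stop, len), instead of scanning every element while maintaining a count and a next_item pointer inside a try/except.
import Mathlib
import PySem

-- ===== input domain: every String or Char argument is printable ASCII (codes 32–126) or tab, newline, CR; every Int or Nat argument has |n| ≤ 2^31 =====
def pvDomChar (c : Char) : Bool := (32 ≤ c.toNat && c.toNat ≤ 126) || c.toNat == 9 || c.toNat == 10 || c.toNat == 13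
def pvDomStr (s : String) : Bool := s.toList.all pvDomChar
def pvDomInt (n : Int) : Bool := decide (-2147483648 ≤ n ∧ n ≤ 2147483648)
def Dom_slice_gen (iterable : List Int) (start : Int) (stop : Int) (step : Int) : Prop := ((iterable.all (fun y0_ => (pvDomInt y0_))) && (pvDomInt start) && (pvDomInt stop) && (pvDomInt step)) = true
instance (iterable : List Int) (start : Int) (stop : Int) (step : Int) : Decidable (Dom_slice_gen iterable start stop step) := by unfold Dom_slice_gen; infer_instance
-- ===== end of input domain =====

-- B replaces A's per-element scan (count / next_item state inside try/except) by materializing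
-- the iterable and jumping directly through the yield indices; objective: simpler.


-- ===== PORT A =====
-- A's while loop: structural recursion on the remaining iterator, carrying count and next_item;
-- the bare except on an exhausted iterator is the [] base case.
def sliceLoop : List Int → Int → Int → Int → Int → List Int
  | [], _, _, _, _ => []
  | x :: rest, count, nextItem, stop, step =>
    if count = stop then []
    else if count = nextItem then x :: sliceLoop rest (count + 1) (nextItem + step) stop step
    else sliceLoop rest (count + 1) nextItem stop step

-- the AssertionError of A's argument check is excluded by Pre_slice_gen; [] stands for the raise
def slice_gen (iterable : List Int) (start : Int) (stop : Int) (step : Int) : List Int :=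
  if start < 0 ∨ stop < 0 ∨ step ≤ 0 then []
  else sliceLoop iterable 0 start stop step

-- ===== PORT B =====
-- B's while loop: i jumps by step while i < bound, yielding items[i]
def sliceAltLoop (items : List Int) (bound : Int) (step : Int) (i : Int) (hs : 0 < step) : List Int :=
  if h : i < bound then
    PySem.List.pyGetD items i 0 :: sliceAltLoop items bound step (i + step) hs
  else []
termination_by (bound - i).toNat
decreasing_by omega

def slice_gen_alt (iterable : List Int) (start : Int) (stop : Int) (step : Int) : List Int :=
  if h : start < 0 ∨ stop < 0 ∨ step ≤ 0 then []
  else sliceAltLoop iterable (min stop (iterable.length : Int)) step start (by omega)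

-- ===== PRECONDITION & SPEC =====
-- Pre_ excludes exactly the arguments on which A raises AssertionError
def Pre_slice_gen (iterable : List Int) (start : Int) (stop : Int) (step : Int) : Prop :=
  0 ≤ start ∧ 0 ≤ stop ∧ 0 < step
instance (iterable : List Int) (start : Int) (stop : Int) (step : Int) : Decidable (Pre_slice_gen iterable start stop step) := by unfold Pre_slice_gen; infer_instance

def pvWitness_slice_gen : List Int × Int × Int × Int := ([3, 1, 4, 1, 5, 9, 2], 1, 6, 2)

def Spec_slice_gen (iterable : List Int) (start : Int) (stop : Int) (step : Int) (out : List Int) : Prop := out = slice_gen_alt iterable start stop step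
instance (iterable : List Int) (start : Int) (stop : Int) (step : Int) (out : List Int) : Decidable (Spec_slice_gen iterable start stop step out) := by unfold Spec_slice_gen; infer_instance

-- ===== CLAIM (what is proved, stated in full; the proofs are below) =====
def Claim_equal_slice_gen : Prop := ∀ (iterable : List Int) (start : Int) (stop : Int) (step : Int), Dom_slice_gen iterable start stop step → Pre_slice_gen iterable start stop step → Spec_slice_gen iterable start stop step (slice_gen iterable start stop step)

-- ===== LEMMAS AND PROOFS =====

theorem sliceAltLoop_nil (items : List Int) (bound step i : Int) (hs : 0 < step)
    (h : ¬ i < bound) : sliceAltLoop items bound step i hs = [] := by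
  rw [sliceAltLoop]; simp [h]

theorem sliceAltLoop_cons (items : List Int) (bound step i : Int) (hs : 0 < step)
    (h : i < bound) :
    sliceAltLoop items bound step i hs =
      PySem.List.pyGetD items i 0 :: sliceAltLoop items bound step (i + step) hs := by
  rw [sliceAltLoop]; simp [h]

-- loop invariant: A's scan from position c with next yield index n equals B's jump loop from n
theorem loop_eq (items : List Int) (stop step : Int) (hs : 0 < step) :
    ∀ (xs : List Int) (c n : Int), 0 ≤ c → c ≤ n → c ≤ stop →
      xs = items.drop c.toNat →
      sliceLoop xs c n stop step =
        sliceAltLoop items (min stop (items.length : Int)) step n hs := by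
  intro xs
  induction xs with
  | nil =>
    intro c n hc hcn hcs hdrop
    have hlen : items.length ≤ c.toNat := by
      by_contra hlt
      have : items.drop c.toNat ≠ [] := by
        simp [List.drop_eq_nil_iff]; omega
      exact this hdrop.symm
    rw [sliceLoop, sliceAltLoop_nil]
    have : (items.length : Int) ≤ n := by omega
    omega
  | cons x rest ih =>
    intro c n hc hcn hcs hdrop
    have hx : items[c.toNat]? = some x := by
      have := @List.getElem?_drop Int items c.toNat 0
      rw [← hdrop] at this
      simpa using this.symm
    have hclen : c.toNat < items.length := (List.getElem?_eq_some_iff.mp hx).1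
    have hrest : rest = items.drop (c.toNat + 1) := by
      have : items.drop (c.toNat + 1) = (items.drop c.toNat).drop 1 := by
        rw [List.drop_drop]
      rw [this, ← hdrop]; simp
    rw [sliceLoop]
    by_cases hstop : c = stop
    · simp only [if_pos hstop]
      rw [sliceAltLoop_nil]
      omega
    · simp only [if_neg hstop]
      have hcstop : c < stop := lt_of_le_of_ne hcs hstop
      by_cases hcn' : c = n
      · simp only [if_pos hcn']
        rw [sliceAltLoop_cons _ _ _ _ _ (by omega)]
        congr 1
        · rw [← hcn', PySem.List.pyGetD_of_nonneg _ _ hc]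
          rw [List.getD_eq_getElem?_getD]; simp [hx]
        · exact ih (c + 1) (n + step) (by omega) (by omega) (by omega)
            (by rw [hrest]; congr 1; omega)
      · simp only [if_neg hcn']
        exact ih (c + 1) n (by omega) (by omega) (by omega)
          (by rw [hrest]; congr 1; omega)

-- ===== VERDICT (by name: the statement is the Claim_ definition above) =====
theorem slice_gen_spec : Claim_equal_slice_gen := by
  intro iterable start stop step _ hpre
  obtain ⟨h1, h2, h3⟩ := hpre
  unfold Spec_slice_gen slice_gen slice_gen_alt
  rw [if_neg (by omega), dif_neg (by omega)]
  exact loop_eq iterable stop step h3 iterable 0 start (le_refl 0) h1 h2 (by simp)
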